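-- pv_equiv track=rewrite | github.com/AhaTree/Auto-RedstoneMusic-for-Minecraft | FunDefs.py | SetBlockLeft
-- ===== SOURCE A (Python) =====
-- def SetBlock(BPOS,SPOS,Cflag):
--
--     stb="setblock"
--     B_Pos=" ~"+BPOS[0]+" ~"+BPOS[1]+" ~"+BPOS[2]
--     B_ID=r" minecraft:"+( "chain_" if Cflag else "" )+"command_block[facing=up]"
--     B_Cmd1=r"{TrackOutput:0,Command:'setblock"
--     S_Pos=" "+SPOS[0]+" "+SPOS[1]+" "+SPOS[2]
--     B_Cmd2=r" minecraft:redstone_block'"+( ",auto:1" if Cflag else "" )+"}"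
--
--     bufer=stb+B_Pos+B_ID+B_Cmd1+S_Pos+B_Cmd2+'\n'
--     return bufer
--
-- def SetBlockLeft(offset,NOTES,speed,BPos):
--
--     bufer=''
--     Kcount=len(NOTES) # key number
--     pos=(offset-1)*speed+1
--     Height=0
--     for k in range(Kcount):
--
--         [px,py,pz]=['','1','']
--         note=NOTES[k]
--         if note<0:
--             pos+=1
--             Height=0
--         px=str(-pos)
--         if pos%2==0:
--             pz='-1'
--         if Height:
--             py=str(Height+1)
--
--
--         BPOS=[str(abs(note)),BPos[1],BPos[2]]
--         bufer+=SetBlock([px,py,pz],BPOS,bool(Height))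
--         Height+=1
--
--     return bufer
-- ===== SOURCE B (Python) =====
-- def SetBlockLeft(offset, NOTES, speed, BPos):
--     # Split NOTES into groups: each negative note starts (and leads) a new group;
--     # the notes before the first negative form the leading group.
--     groups = []
--     cur = []
--     for n in NOTES:
--         if n < 0:
--             groups.append(cur)
--             cur = [n]
--         else:
--             cur.append(n)
--     groups.append(cur)
--
--     lines = []
--     pos = (offset - 1) * speed + 1
--     first = True
--     for g in groups:
--         if not first:
--             pos += 1
--         first = False
--         for h, note in enumerate(g):
--             py = str(h + 1) if h else '1'
--             pz = '-1' if pos % 2 == 0 else ''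
--             chain = "chain_" if h else ""
--             auto = ",auto:1" if h else ""
--             lines.append("setblock ~" + str(-pos) + " ~" + py + " ~" + pz
--                          + " minecraft:" + chain + "command_block[facing=up]"
--                          + "{TrackOutput:0,Command:'setblock"
--                          + " " + str(abs(note)) + " " + BPos[1] + " " + BPos[2]
--                          + " minecraft:redstone_block'" + auto + "}\n")
--     return "".join(lines)
-- ===== Notes on version B (the rewrite author's own statement) =====
-- stated objective: alternative
-- what changed: B first splits NOTES into negative-led groups and renders each group with a local height index via a nested loop and a final join, replacing A's single loop that threads mutable pos/Height state and string-concatenates through a SetBlock helper.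
import Mathlib
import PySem

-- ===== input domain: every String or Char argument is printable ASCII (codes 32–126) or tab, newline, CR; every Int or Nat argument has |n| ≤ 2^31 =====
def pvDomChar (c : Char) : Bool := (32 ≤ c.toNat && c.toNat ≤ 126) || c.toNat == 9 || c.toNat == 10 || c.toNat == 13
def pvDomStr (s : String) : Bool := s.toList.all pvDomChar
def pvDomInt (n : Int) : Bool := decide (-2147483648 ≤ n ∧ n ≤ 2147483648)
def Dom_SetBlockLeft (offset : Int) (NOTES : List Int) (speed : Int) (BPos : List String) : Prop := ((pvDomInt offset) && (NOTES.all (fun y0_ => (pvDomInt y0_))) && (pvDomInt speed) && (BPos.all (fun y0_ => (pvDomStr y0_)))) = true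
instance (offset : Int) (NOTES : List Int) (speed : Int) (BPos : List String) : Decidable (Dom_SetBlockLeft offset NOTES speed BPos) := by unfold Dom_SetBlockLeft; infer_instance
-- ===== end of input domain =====

-- B re-groups the notes by their negative leaders and renders each group with a local
-- height index, instead of A's single loop with mutable Height/pos state (objective: alternative).

-- ===== PORT A =====
-- indices into the literal 3-element lists are always in range, so `.getD ""` is never hit
def SetBlock (BPOS : List String) (SPOS : List String) (Cflag : Bool) : String :=
  let stb := "setblock"
  let B_Pos := " ~" ++ PySem.List.pyGetD BPOS 0 "" ++ " ~" ++ PySem.List.pyGetD BPOS 1 "" ++ " ~" ++ PySem.List.pyGetD BPOS 2 ""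
  let B_ID := " minecraft:" ++ (if Cflag then "chain_" else "") ++ "command_block[facing=up]"
  let B_Cmd1 := "{TrackOutput:0,Command:'setblock"
  let S_Pos := " " ++ PySem.List.pyGetD SPOS 0 "" ++ " " ++ PySem.List.pyGetD SPOS 1 "" ++ " " ++ PySem.List.pyGetD SPOS 2 ""
  let B_Cmd2 := " minecraft:redstone_block'" ++ (if Cflag then ",auto:1" else "") ++ "}"
  stb ++ B_Pos ++ B_ID ++ B_Cmd1 ++ S_Pos ++ B_Cmd2 ++ "\n"

def SetBlockLeft (offset : Int) (NOTES : List Int) (speed : Int) (BPos : List String) : String :=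
  let Kcount : Int := PySem.List.len NOTES
  let st := (PySem.List.pyRange 0 Kcount 1).foldl
    (fun (st : String × Int × Int) k =>
      let note := PySem.List.pyGetD NOTES k 0
      let pos := if note < 0 then st.2.1 + 1 else st.2.1
      let Height := if note < 0 then 0 else st.2.2
      let px := PySem.Int.toStr (-pos)
      let pz := if PySem.Int.mod pos 2 = 0 then "-1" else ""
      let py := if Height != 0 then PySem.Int.toStr (Height + 1) else "1"
      let BPOS := [PySem.Int.toStr |note|, PySem.List.pyGetD BPos 1 "", PySem.List.pyGetD BPos 2 ""]
      (st.1 ++ SetBlock [px, py, pz] BPOS (Height != 0), pos, Height + 1))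
    ("", (offset - 1) * speed + 1, 0)
  st.1

-- ===== PORT B =====
def pvLine (pos : Int) (h : Int) (note : Int) (BPos : List String) : String :=
  let py := if h != 0 then PySem.Int.toStr (h + 1) else "1"
  let pz := if PySem.Int.mod pos 2 = 0 then "-1" else ""
  let chain := if h != 0 then "chain_" else ""
  let auto := if h != 0 then ",auto:1" else ""
  "setblock ~" ++ PySem.Int.toStr (-pos) ++ " ~" ++ py ++ " ~" ++ pz
    ++ " minecraft:" ++ chain ++ "command_block[facing=up]"
    ++ "{TrackOutput:0,Command:'setblock"
    ++ " " ++ PySem.Int.toStr |note| ++ " " ++ PySem.List.pyGetD BPos 1 "" ++ " " ++ PySem.List.pyGetD BPos 2 ""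
    ++ " minecraft:redstone_block'" ++ auto ++ "}\n"

def SetBlockLeft_alt (offset : Int) (NOTES : List Int) (speed : Int) (BPos : List String) : String :=
  let split := NOTES.foldl (fun (st : List (List Int) × List Int) n =>
      if n < 0 then (st.1 ++ [st.2], [n]) else (st.1, st.2 ++ [n])) ([], [])
  let groups := split.1 ++ [split.2]
  let st := groups.foldl (fun (st : List String × Int × Bool) g =>
      let pos := if st.2.2 then st.2.1 else st.2.1 + 1
      (st.1 ++ (PySem.List.enumerate g 0).map (fun p => pvLine pos p.1 p.2 BPos), pos, false))
    ([], (offset - 1) * speed + 1, true)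
  PySem.Str.join "" st.1

-- ===== PRECONDITION & SPEC =====
-- A (and B) index BPos[1] and BPos[2] for every note, so with a non-empty NOTES a BPos
-- shorter than 3 raises IndexError in Python; exactly those inputs are excluded.
def Pre_SetBlockLeft (offset : Int) (NOTES : List Int) (speed : Int) (BPos : List String) : Prop :=
  NOTES = [] ∨ 3 ≤ BPos.length
instance (offset : Int) (NOTES : List Int) (speed : Int) (BPos : List String) : Decidable (Pre_SetBlockLeft offset NOTES speed BPos) := by unfold Pre_SetBlockLeft; infer_instance

def pvWitness_SetBlockLeft : Int × List Int × Int × List String := (2, [3, -5, 7], 1, ["0", "4", "8"])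

def Spec_SetBlockLeft (offset : Int) (NOTES : List Int) (speed : Int) (BPos : List String) (out : String) : Prop := out = SetBlockLeft_alt offset NOTES speed BPos
instance (offset : Int) (NOTES : List Int) (speed : Int) (BPos : List String) (out : String) : Decidable (Spec_SetBlockLeft offset NOTES speed BPos out) := by unfold Spec_SetBlockLeft; infer_instance

-- ===== CLAIM (what is proved, stated in full; the proofs are below) =====
def Claim_equal_SetBlockLeft : Prop := ∀ (offset : Int) (NOTES : List Int) (speed : Int) (BPos : List String), Dom_SetBlockLeft offset NOTES speed BPos → Pre_SetBlockLeft offset NOTES speed BPos → Spec_SetBlockLeft offset NOTES speed BPos (SetBlockLeft offset NOTES speed BPos)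

-- ===== LEMMAS AND PROOFS =====

def pvSpec (BPos : List String) : List Int → Int → Int → String
  | [], _, _ => ""
  | n :: t, pos, h =>
    if n < 0 then pvLine (pos + 1) 0 n BPos ++ pvSpec BPos t (pos + 1) 1
    else pvLine pos h n BPos ++ pvSpec BPos t pos (h + 1)

theorem pvGet0 {a b c : String} : PySem.List.pyGetD [a,b,c] 0 "" = a := by simp [PySem.List.pyGetD, PySem.List.pyGet?, PySem.List.pyIdx?]
theorem pvGet1 {a b c : String} : PySem.List.pyGetD [a,b,c] 1 "" = b := by simp [PySem.List.pyGetD, PySem.List.pyGet?, PySem.List.pyIdx?]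
theorem pvGet2 {a b c : String} : PySem.List.pyGetD [a,b,c] 2 "" = c := by simp [PySem.List.pyGetD, PySem.List.pyGet?, PySem.List.pyIdx?]

theorem pv_setblock_eq_line (pos h note : Int) (BPos : List String) :
    SetBlock [PySem.Int.toStr (-pos),
              (if h != 0 then PySem.Int.toStr (h + 1) else "1"),
              (if PySem.Int.mod pos 2 = 0 then "-1" else "")]
             [PySem.Int.toStr |note|, PySem.List.pyGetD BPos 1 "", PySem.List.pyGetD BPos 2 ""]
             (h != 0)
      = pvLine pos h note BPos := by
  simp only [SetBlock, pvLine, pvGet0, pvGet1, pvGet2]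
  split_ifs <;> (apply String.ext; simp [List.append_assoc])

theorem pv_A_fold (BPos : List String) (notes : List Int) :
    ∀ (buf : String) (pos h : Int),
      (notes.foldl
        (fun (st : String × Int × Int) note =>
          let pos := if note < 0 then st.2.1 + 1 else st.2.1
          let Height := if note < 0 then 0 else st.2.2
          let px := PySem.Int.toStr (-pos)
          let pz := if PySem.Int.mod pos 2 = 0 then "-1" else ""
          let py := if Height != 0 then PySem.Int.toStr (Height + 1) else "1"
          let BPOS := [PySem.Int.toStr |note|, PySem.List.pyGetD BPos 1 "", PySem.List.pyGetD BPos 2 ""]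
          (st.1 ++ SetBlock [px, py, pz] BPOS (Height != 0), pos, Height + 1))
        (buf, pos, h)).1 = buf ++ pvSpec BPos notes pos h := by
  induction notes with
  | nil => intro buf pos h; simp [pvSpec]
  | cons n t ih =>
    intro buf pos h
    by_cases hn : n < 0
    · simp only [List.foldl_cons, if_pos hn, pvSpec]
      rw [ih, pv_setblock_eq_line]
      simp [String.append_assoc]
    · simp only [List.foldl_cons, if_neg hn, pvSpec]
      rw [ih, pv_setblock_eq_line]
      simp [String.append_assoc, hn]

def pvAG : List Int → List Int → List (List Int)
  | cur, [] => [cur]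
  | cur, n :: t => if n < 0 then cur :: pvAG [n] t else pvAG (cur ++ [n]) t

theorem pv_split_fold (ns : List Int) :
    ∀ (gs : List (List Int)) (cur : List Int),
      (ns.foldl (fun (st : List (List Int) × List Int) n =>
          if n < 0 then (st.1 ++ [st.2], [n]) else (st.1, st.2 ++ [n])) (gs, cur)).1
        ++ [(ns.foldl (fun (st : List (List Int) × List Int) n =>
          if n < 0 then (st.1 ++ [st.2], [n]) else (st.1, st.2 ++ [n])) (gs, cur)).2]
      = gs ++ pvAG cur ns := by
  induction ns with
  | nil => intro gs cur; simp [pvAG]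
  | cons n t ih =>
    intro gs cur
    by_cases hn : n < 0
    · simp only [List.foldl_cons, if_pos hn, pvAG, ih]
      simp
    · simp only [List.foldl_cons, if_neg hn, pvAG, ih]

def pvRender (BPos : List String) : List (List Int) → Int → Bool → List String
  | [], _, _ => []
  | g :: t, pos, first =>
    let q := if first then pos else pos + 1
    (PySem.List.enumerate g 0).map (fun p => pvLine q p.1 p.2 BPos) ++ pvRender BPos t q false

theorem pv_render_fold (BPos : List String) (groups : List (List Int)) :
    ∀ (lines : List String) (pos : Int) (first : Bool),
      (groups.foldl (fun (st : List String × Int × Bool) g =>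
          let pos := if st.2.2 then st.2.1 else st.2.1 + 1
          (st.1 ++ (PySem.List.enumerate g 0).map (fun p => pvLine pos p.1 p.2 BPos), pos, false))
        (lines, pos, first)).1
      = lines ++ pvRender BPos groups pos first := by
  induction groups with
  | nil => intro lines pos first; simp [pvRender]
  | cons g t ih =>
    intro lines pos first
    cases first <;> simp only [List.foldl_cons, pvRender, ih] <;> simp

def pvCat : List String → String
  | [] => ""
  | l :: t => l ++ pvCat t

theorem pv_join_empty_eq_cat (lines : List String) : PySem.Str.join "" lines = pvCat lines := by
  induction lines with
  | nil => decide
  | cons l t ih =>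
    simp only [PySem.Str.join, PySem.Chars.join] at *
    apply String.ext
    simp only [List.map_cons]
    rw [show ("".toList : List Char).intercalate (l.toList :: List.map String.toList t)
        = l.toList ++ ("".toList : List Char).intercalate (List.map String.toList t) from ?_]
    · simp [pvCat, ← ih]
    · cases t <;> simp [List.intercalate, List.intersperse]

theorem pv_cat_append (xs ys : List String) : pvCat (xs ++ ys) = pvCat xs ++ pvCat ys := by
  induction xs with
  | nil => simp [pvCat]
  | cons l t ih => simp [pvCat, ih, String.append_assoc]

theorem pv_key (BPos : List String) (ns : List Int) :
    ∀ (cur : List Int) (pos : Int) (first : Bool),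
      pvCat (pvRender BPos (pvAG cur ns) pos first)
        = pvCat ((PySem.List.enumerate cur 0).map
            (fun p => pvLine (if first then pos else pos + 1) p.1 p.2 BPos))
          ++ pvSpec BPos ns (if first then pos else pos + 1) (cur.length : Int) := by
  induction ns with
  | nil =>
    intro cur pos first
    simp [pvAG, pvRender, pvSpec, pv_cat_append, pvCat]
  | cons n t ih =>
    intro cur pos first
    by_cases hn : n < 0
    · simp only [pvAG, if_pos hn, pvRender, pvSpec, pv_cat_append]
      rw [ih [n] (if first then pos else pos + 1) false]
      simp [PySem.List.enumerate, pvCat, pvSpec, if_pos hn, String.append_assoc]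
    · simp only [pvAG, if_neg hn, pvSpec]
      rw [ih (cur ++ [n]) pos first]
      simp only [PySem.List.enumerate_append, List.map_append, pv_cat_append]
      simp [PySem.List.enumerate, pvCat, pvSpec, if_neg hn, String.append_assoc]

theorem SetBlockLeft_alt_eq_spec (offset : Int) (NOTES : List Int) (speed : Int) (BPos : List String) :
    SetBlockLeft_alt offset NOTES speed BPos = pvSpec BPos NOTES ((offset - 1) * speed + 1) 0 := by
  simp only [SetBlockLeft_alt]
  rw [pv_split_fold NOTES [] [], pv_render_fold, pv_join_empty_eq_cat]
  have := pv_key BPos NOTES [] ((offset - 1) * speed + 1) true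
  simp [PySem.List.enumerate, pvCat] at this
  simpa using this

theorem SetBlockLeft_eq_spec (offset : Int) (NOTES : List Int) (speed : Int) (BPos : List String) :
    SetBlockLeft offset NOTES speed BPos = pvSpec BPos NOTES ((offset - 1) * speed + 1) 0 := by
  simp only [SetBlockLeft]
  rw [show PySem.List.len NOTES = (NOTES.length : Int) from rfl]
  rw [PySem.List.foldl_pyRange_zero_pyGetD' NOTES (0 : Int)
      (fun (st : String × Int × Int) note =>
        let pos := if note < 0 then st.2.1 + 1 else st.2.1
        let Height := if note < 0 then 0 else st.2.2
        let px := PySem.Int.toStr (-pos)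
        let pz := if PySem.Int.mod pos 2 = 0 then "-1" else ""
        let py := if Height != 0 then PySem.Int.toStr (Height + 1) else "1"
        let BPOS := [PySem.Int.toStr |note|, PySem.List.pyGetD BPos 1 "", PySem.List.pyGetD BPos 2 ""]
        (st.1 ++ SetBlock [px, py, pz] BPOS (Height != 0), pos, Height + 1))
      ("", (offset - 1) * speed + 1, 0)]
  exact pv_A_fold BPos NOTES "" ((offset - 1) * speed + 1) 0

-- ===== VERDICT (by name: the statement is the Claim_ definition above) =====
theorem SetBlockLeft_spec : Claim_equal_SetBlockLeft := by
  intro offset NOTES speed BPos _ _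
  unfold Spec_SetBlockLeft
  rw [SetBlockLeft_eq_spec, SetBlockLeft_alt_eq_spec]
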